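-- pv_equiv track=rewrite | github.com/smezin/CODING-Challenges-and-Competitions | leetcode/odd_even_jump.py | next_from_even
-- ===== SOURCE A (Python) =====
-- def next_from_even(index, arr):
--     if (index == -1):
--         return -1
--     next_smaller = None
--     next_smaller_i = -1
--     for i in range(index, len(arr)):
--         if arr[i] == arr[index] and i > index:
--             return i
--         if arr[i] < arr[index]:
--             if next_smaller is None or arr[i] > next_smaller:
--                 next_smaller_i = i
--                 next_smaller = arr[i]
--     if next_smaller_i < index:
--         return -1
--     return next_smaller_i
-- ===== SOURCE B (Python) =====
-- def next_from_even(index, arr):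
--     if not 0 <= index < len(arr):
--         return -1
--     target = arr[index]
--     suffix = arr[index + 1:]
--     if target in suffix:
--         return index + 1 + suffix.index(target)
--     smaller = [v for v in suffix if v < target]
--     if not smaller:
--         return -1
--     return index + 1 + suffix.index(max(smaller))
-- ===== Notes on version B (the rewrite author's own statement) =====
-- stated objective: simpler
-- what changed: Replaced A's single fused loop carrying a running-max state pair with an index-validation guard plus a slice-based decomposition: find the first equal value in the suffix, otherwise take max() of the strictly-smaller values and locate its first occurrence; Pre_ excludes index < -1, where A's value comes from Python's negative-index wraparound.
-- outside the precondition, e.g. on next_from_even(-2, [1, 2]): A returns 0, B returns -1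
import Mathlib
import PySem

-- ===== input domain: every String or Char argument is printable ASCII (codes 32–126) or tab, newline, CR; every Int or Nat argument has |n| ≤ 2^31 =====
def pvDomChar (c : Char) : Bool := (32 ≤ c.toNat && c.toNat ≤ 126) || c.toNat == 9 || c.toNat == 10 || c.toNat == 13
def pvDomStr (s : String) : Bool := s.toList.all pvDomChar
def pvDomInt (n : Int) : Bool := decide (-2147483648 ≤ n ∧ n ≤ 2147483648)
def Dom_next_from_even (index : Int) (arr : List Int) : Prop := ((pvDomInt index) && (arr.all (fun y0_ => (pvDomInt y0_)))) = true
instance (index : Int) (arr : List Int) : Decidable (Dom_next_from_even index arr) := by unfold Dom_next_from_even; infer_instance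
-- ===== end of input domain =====

-- B replaces A's fused running-max loop with a find-equal pass over the suffix followed by a
-- max-of-smaller-values pass and a locate pass (objective: simpler).

-- ===== PORT A =====
-- the loop 'for i in range(index, len(arr))' with early return and running-max state (next_smaller, next_smaller_i);
-- arr[i] / arr[index] via pyGet?; the getD 0 fallback is only reached where Python A raises IndexError (outside Pre_)
def nfeLoop (arr : List Int) (index : Int) : List Int → Option Int → Int → Int
  | [], _, nsi => if nsi < index then -1 else nsi
  | i :: rest, ns, nsi =>
    let ai := (PySem.List.pyGet? arr i).getD 0
    let t := (PySem.List.pyGet? arr index).getD 0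
    if ai = t ∧ index < i then i
    else if ai < t then
      match ns with
      | none => nfeLoop arr index rest (some ai) i
      | some m => if m < ai then nfeLoop arr index rest (some ai) i else nfeLoop arr index rest ns nsi
    else nfeLoop arr index rest ns nsi

def next_from_even (index : Int) (arr : List Int) : Int :=
  if index = -1 then -1
  else nfeLoop arr index (PySem.List.pyRange index (arr.length : Int)) none (-1)

-- ===== PORT B =====
def next_from_even_alt (index : Int) (arr : List Int) : Int :=
  if ¬ (0 ≤ index ∧ index < (arr.length : Int)) then -1
  else
    let target := (PySem.List.pyGet? arr index).getD 0
    let suffix := PySem.List.slice arr (some (index + 1)) none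
    match PySem.List.index? suffix target with
    | some j => index + 1 + (j : Int)
    | none =>
      let smaller := suffix.filter (fun v => v < target)
      if smaller = [] then -1
      else index + 1 + (((PySem.List.index? suffix ((PySem.List.max? smaller (fun y => y)).getD 0)).getD 0 : Nat) : Int)

-- ===== PRECONDITION & SPEC =====
-- Pre_ excludes exactly index < -1: there A either raises IndexError (index < -len) or returns a
-- value that is an accident of Python's negative-index wraparound, while B reports no jump target (-1).
def Pre_next_from_even (index : Int) (arr : List Int) : Prop :=
  -1 ≤ index
instance (index : Int) (arr : List Int) : Decidable (Pre_next_from_even index arr) := by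
  unfold Pre_next_from_even; infer_instance

def pvWitness_next_from_even : Int × List Int := (1, [4, 3, 5, 2, 3, 1])

def Spec_next_from_even (index : Int) (arr : List Int) (out : Int) : Prop := out = next_from_even_alt index arr
instance (index : Int) (arr : List Int) (out : Int) : Decidable (Spec_next_from_even index arr out) := by unfold Spec_next_from_even; infer_instance

-- ===== CLAIM (what is proved, stated in full; the proofs are below) =====
def Claim_equal_next_from_even : Prop := ∀ (index : Int) (arr : List Int), Dom_next_from_even index arr → Pre_next_from_even index arr → Spec_next_from_even index arr (next_from_even index arr)

-- ===== LEMMAS AND PROOFS =====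

-- B's value, generalized over the running-max state (ns, nsi) that A's loop carries: the induction target.
def bView (t k : Int) (s : List Int) (ns : Option Int) (nsi : Int) : Int :=
  match PySem.List.index? s t with
  | some j => k + (j : Int)
  | none =>
    match PySem.List.max? (s.filter (fun v => v < t)) (fun y => y), ns with
    | none, none => -1
    | none, some _ => nsi
    | some m, none => k + (((PySem.List.index? s m).getD 0 : Nat) : Int)
    | some m, some m0 =>
      if m0 < m then k + (((PySem.List.index? s m).getD 0 : Nat) : Int) else nsi

lemma foldl_max_shift (c : List Int) : ∀ v w : Int, c.foldl max (max v w) = max v (c.foldl max w) := by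
  induction c with
  | nil => intro v w; simp
  | cons a c ih =>
    intro v w
    have h : max (max v w) a = max v (max w a) := by omega
    simp only [List.foldl_cons, h, ih]

lemma foldl_max_head (a : Int) (c : List Int) (v : Int) :
    (a :: c).foldl max v = max v (c.foldl max a) := by
  have := foldl_max_shift c v a
  simpa using this

lemma foldl_max_mem (c : List Int) : ∀ a : Int, c.foldl max a ∈ a :: c := by
  induction c with
  | nil => intro a; simp
  | cons b c ih =>
    intro a
    simp only [List.foldl_cons]
    have h := ih (max a b)
    rcases List.mem_cons.1 h with h | h
    · rcases max_choice a b with hm | hm <;> rw [h, hm] <;> simp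
    · simp [h]

lemma mem_filter_lt {t x : Int} {s : List Int} (h : x ∈ s.filter (fun v => decide (v < t))) :
    x ∈ s ∧ x < t := by
  have := List.mem_filter.1 h
  simpa using this

lemma bView_eq_head (t k v : Int) (s : List Int) (hvt : v = t) (ns : Option Int) (nsi : Int) :
    bView t k (v :: s) ns nsi = k := by
  subst hvt
  unfold bView
  rw [PySem.List.index?_cons_self]
  simp

lemma index?_shift (s : List Int) (v m : Int) (hm : m ∈ s) (hne : v ≠ m) :
    (((PySem.List.index? (v :: s) m).getD 0 : Nat) : Int)
      = (((PySem.List.index? s m).getD 0 : Nat) : Int) + 1 := by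
  rcases Option.isSome_iff_exists.1 ((PySem.List.index?_isSome_iff s m).2 hm) with ⟨j, hj⟩
  rw [PySem.List.index?_cons_of_ne _ hne, hj]
  simp

lemma max?_nil_int : PySem.List.max? ([] : List Int) (fun y => y) = none :=
  (PySem.List.max?_eq_none_iff _ _).2 rfl

-- update step: v < t and v strictly improves the running max ⇒ state becomes (some v, k)
lemma bView_upd (t k v : Int) (s : List Int) (hvt : v ≠ t) (hv : v < t)
    (ns : Option Int) (nsi : Int)
    (h : ns = none ∨ ∃ m0, ns = some m0 ∧ m0 < v) :
    bView t k (v :: s) ns nsi = bView t (k + 1) s (some v) k := by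
  unfold bView
  rw [PySem.List.index?_cons_of_ne _ hvt]
  rcases hidx : PySem.List.index? s t with _ | j
  · simp only [Option.map_none]
    have hfil : (v :: s).filter (fun x => decide (x < t)) = v :: s.filter (fun x => decide (x < t)) := by
      simp [hv]
    rw [hfil]
    rcases hc : s.filter (fun x => decide (x < t)) with _ | ⟨a, c⟩
    · have h1 : PySem.List.max? [v] (fun y => y) = some v := by
        simpa using PySem.List.max?_id_cons v []
      rw [h1, max?_nil_int]
      rcases h with h | ⟨m0, hm0, hlt⟩
      · subst h
        dsimp only
        rw [PySem.List.index?_cons_self]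
        simp
      · subst hm0
        dsimp only
        rw [PySem.List.index?_cons_self, if_pos hlt]
        simp
    · have hmval : PySem.List.max? (v :: a :: c) (fun y => y) = some (max v (c.foldl max a)) := by
        rw [PySem.List.max?_id_cons, foldl_max_head]
      have hmS : PySem.List.max? (a :: c) (fun y => y) = some (c.foldl max a) :=
        PySem.List.max?_id_cons a c
      set mS := c.foldl max a with hmSd
      have hmemf : mS ∈ s.filter (fun x => decide (x < t)) := by rw [hc]; exact foldl_max_mem c a
      have hmem : mS ∈ s := (mem_filter_lt hmemf).1
      rw [hmval, hmS]
      rcases h with h | ⟨m0, hm0, hlt⟩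
      · subst h
        dsimp only
        by_cases hvm : v < mS
        · have hmax : max v mS = mS := by omega
          rw [hmax, if_pos hvm, index?_shift s v mS hmem (by omega)]
          ring
        · have hmax : max v mS = v := by omega
          rw [hmax, if_neg hvm, PySem.List.index?_cons_self]
          simp
      · subst hm0
        dsimp only
        by_cases hvm : v < mS
        · have hmax : max v mS = mS := by omega
          rw [hmax, if_pos (by omega : m0 < mS), if_pos hvm, index?_shift s v mS hmem (by omega)]
          ring
        · have hmax : max v mS = v := by omega
          rw [hmax, if_pos hlt, if_neg hvm, PySem.List.index?_cons_self]
          simp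
  · simp only [Option.map_some]
    show k + (((j + 1 : Nat) : Int)) = k + 1 + (j : Int)
    push_cast
    ring

-- keep step: either v > t, or v < t but does not strictly improve the running max
lemma bView_keep (t k v : Int) (s : List Int) (hvt : v ≠ t)
    (ns : Option Int) (nsi : Int)
    (h : ¬ v < t ∨ ∃ m0, ns = some m0 ∧ ¬ m0 < v) :
    bView t k (v :: s) ns nsi = bView t (k + 1) s ns nsi := by
  unfold bView
  rw [PySem.List.index?_cons_of_ne _ hvt]
  rcases hidx : PySem.List.index? s t with _ | j
  · simp only [Option.map_none]
    by_cases hvlt : v < t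
    · -- v < t but ns = some m0 with v ≤ m0
      rcases h with h | ⟨m0, hm0, hge⟩
      · exact absurd hvlt h
      subst hm0
      have hfil : (v :: s).filter (fun x => decide (x < t)) = v :: s.filter (fun x => decide (x < t)) := by
        simp [hvlt]
      rw [hfil]
      rcases hc : s.filter (fun x => decide (x < t)) with _ | ⟨a, c⟩
      · have h1 : PySem.List.max? [v] (fun y => y) = some v := by
          simpa using PySem.List.max?_id_cons v []
        rw [h1, max?_nil_int]
        dsimp only
        rw [if_neg hge]
      · have hmval : PySem.List.max? (v :: a :: c) (fun y => y) = some (max v (c.foldl max a)) := by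
          rw [PySem.List.max?_id_cons, foldl_max_head]
        have hmS : PySem.List.max? (a :: c) (fun y => y) = some (c.foldl max a) :=
          PySem.List.max?_id_cons a c
        set mS := c.foldl max a with hmSd
        have hmemf : mS ∈ s.filter (fun x => decide (x < t)) := by rw [hc]; exact foldl_max_mem c a
        have hmem : mS ∈ s := (mem_filter_lt hmemf).1
        rw [hmval, hmS]
        dsimp only
        by_cases hvm : v < mS
        · have hmax : max v mS = mS := by omega
          rw [hmax, index?_shift s v mS hmem (by omega)]
          by_cases h1 : m0 < mS
          · rw [if_pos h1, if_pos h1]; ring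
          · rw [if_neg h1, if_neg h1]
        · have hmax : max v mS = v := by omega
          rw [hmax, if_neg hge, if_neg (by omega : ¬ m0 < mS)]
    · -- v ≥ t (and v ≠ t): v contributes nothing to the smaller-values pass
      have hfil : (v :: s).filter (fun x => decide (x < t)) = s.filter (fun x => decide (x < t)) := by
        simp [hvlt]
      rw [hfil]
      rcases hm : PySem.List.max? (s.filter (fun x => decide (x < t))) (fun y => y) with _ | m
      · rcases ns with _ | m0 <;> rfl
      · have hmemf : m ∈ s.filter (fun x => decide (x < t)) := PySem.List.max?_mem hm
        obtain ⟨hmem, hmlt⟩ := mem_filter_lt hmemf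
        have hne2 : v ≠ m := by omega
        rcases ns with _ | m0
        · dsimp only
          rw [index?_shift s v m hmem hne2]
          ring
        · dsimp only
          rw [index?_shift s v m hmem hne2]
          by_cases h1 : m0 < m
          · rw [if_pos h1, if_pos h1]; ring
          · rw [if_neg h1, if_neg h1]
  · simp only [Option.map_some]
    show k + (((j + 1 : Nat) : Int)) = k + 1 + (j : Int)
    push_cast
    ring

-- the main correspondence: A's loop from position n with state (ns, nsi) equals bView on arr[n:]
lemma loop_eq (arr : List Int) (index : Int) (hidx0 : 0 ≤ index) :
    ∀ (s : List Int) (n : Nat), List.drop n arr = s → index < (n : Int) →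
    ∀ (ns : Option Int) (nsi : Int),
      (ns = none → nsi = -1) → (∀ m, ns = some m → index < nsi) →
      nfeLoop arr index (PySem.List.pyRange (n : Int) (arr.length : Int)) ns nsi
        = bView ((PySem.List.pyGet? arr index).getD 0) (n : Int) s ns nsi := by
  intro s
  induction s with
  | nil =>
    intro n hdrop hlt ns nsi hn hs
    have hlen : arr.length ≤ n := List.drop_eq_nil_iff.1 hdrop
    rw [PySem.List.pyRange_one_eq_nil (by exact_mod_cast hlen)]
    rcases ns with _ | m
    · have : nsi = -1 := hn rfl
      subst this
      simp only [nfeLoop, bView]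
      rw [if_pos (by omega)]
      rfl
    · have h1 := hs m rfl
      simp only [nfeLoop, bView]
      rw [if_neg (by omega)]
      rfl
  | cons v s' ih =>
    intro n hdrop hlt ns nsi hn hs
    have hne : List.drop n arr ≠ [] := by rw [hdrop]; simp
    have hlen : n < arr.length := by
      by_contra hcon
      exact hne (List.drop_eq_nil_iff.2 (by omega))
    have hget : arr[n]? = some v := by
      have h0 : (List.drop n arr)[0]? = arr[n]? := by
        simp [List.getElem?_drop]
      rw [← h0, hdrop]
      rfl
    have hdrop' : List.drop (n + 1) arr = s' := by
      have : List.drop 1 (List.drop n arr) = List.drop (n + 1) arr := by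
        rw [List.drop_drop]
      rw [← this, hdrop]
      rfl
    rw [PySem.List.pyRange_one_cons (by exact_mod_cast hlen)]
    have hcast : ((n : Int) + 1) = ((n + 1 : Nat) : Int) := by push_cast; ring
    set t := (PySem.List.pyGet? arr index).getD 0 with htd
    have hai : (PySem.List.pyGet? arr (n : Int)).getD 0 = v := by
      rw [PySem.List.pyGet?_natCast, hget]
      rfl
    simp only [nfeLoop, hai]
    by_cases hvt : v = t
    · rw [if_pos ⟨hvt, hlt⟩, bView_eq_head t (n : Int) v s' hvt]
    · rw [if_neg (by tauto)]
      by_cases hvlt : v < t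
      · rw [if_pos hvlt]
        rcases ns with _ | m
        · dsimp only
          rw [hcast]
          rw [ih (n + 1) hdrop' (by push_cast; omega) (some v) (n : Int)
            (by intro h; cases h) (by intro m hm; omega)]
          rw [← hcast, bView_upd t (n : Int) v s' hvt hvlt none nsi (Or.inl rfl)]
        · dsimp only
          by_cases hmv : m < v
          · rw [if_pos hmv, hcast]
            rw [ih (n + 1) hdrop' (by push_cast; omega) (some v) (n : Int)
              (by intro h; cases h) (by intro m' hm'; omega)]
            rw [← hcast, bView_upd t (n : Int) v s' hvt hvlt (some m) nsi (Or.inr ⟨m, rfl, hmv⟩)]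
          · rw [if_neg hmv, hcast]
            rw [ih (n + 1) hdrop' (by push_cast; omega) (some m) nsi
              (by intro h; cases h) hs]
            rw [← hcast, bView_keep t (n : Int) v s' hvt (some m) nsi (Or.inr ⟨m, rfl, hmv⟩)]
      · rw [if_neg hvlt, hcast]
        rw [ih (n + 1) hdrop' (by push_cast; omega) ns nsi hn hs]
        rw [← hcast, bView_keep t (n : Int) v s' hvt ns nsi (Or.inl hvlt)]

-- B's two-pass expression IS bView with the initial state (none, -1)
lemma alt_eq_bView (index : Int) (arr : List Int) (h0 : 0 ≤ index) (hlen : index < (arr.length : Int)) :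
    next_from_even_alt index arr
      = bView ((PySem.List.pyGet? arr index).getD 0) (index + 1)
          (List.drop (index + 1).toNat arr) none (-1) := by
  unfold next_from_even_alt bView
  rw [if_neg (by push_neg; exact ⟨h0, hlen⟩ : ¬ ¬ (0 ≤ index ∧ index < (arr.length : Int)))]
  simp only []
  rw [PySem.List.slice_from arr (by omega : (0:Int) ≤ index + 1)]
  set t := (PySem.List.pyGet? arr index).getD 0 with htd
  set s := List.drop (index + 1).toNat arr with hsd
  rcases hidx : PySem.List.index? s t with _ | j
  · rcases hm : PySem.List.max? (s.filter (fun v => decide (v < t))) (fun y => y) with _ | m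
    · have hfil : s.filter (fun v => decide (v < t)) = [] := (PySem.List.max?_eq_none_iff _ _).1 hm
      rw [if_pos hfil]
    · have hnil : s.filter (fun v => decide (v < t)) ≠ [] := by
        intro hcon
        rw [hcon, max?_nil_int] at hm
        simp at hm
      rw [if_neg hnil]
      rfl
  · rfl

-- ===== VERDICT (by name: the statement is the Claim_ definition above) =====
theorem next_from_even_spec : Claim_equal_next_from_even := by
  intro index arr _hdom hpre
  unfold Spec_next_from_even
  by_cases hm1 : index = -1
  · subst hm1
    simp [next_from_even, next_from_even_alt]
  · have h0 : 0 ≤ index := by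
      unfold Pre_next_from_even at hpre
      omega
    by_cases hlen : index < (arr.length : Int)
    · -- the valid-index case: A's loop first visits index itself (a no-op), then the suffix
      unfold next_from_even
      rw [if_neg hm1]
      rw [PySem.List.pyRange_one_cons hlen]
      have hstep : nfeLoop arr index (index :: PySem.List.pyRange (index + 1) (arr.length : Int)) none (-1)
          = nfeLoop arr index (PySem.List.pyRange (index + 1) (arr.length : Int)) none (-1) := by
        simp only [nfeLoop]
        rw [if_neg (by simp), if_neg (by omega)]
      rw [hstep]
      have hcast : index + 1 = ((index.toNat + 1 : Nat) : Int) := by omega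
      rw [hcast]
      rw [loop_eq arr index h0 (List.drop (index.toNat + 1) arr) (index.toNat + 1) rfl
        (by omega) none (-1) (fun _ => rfl) (by intro m hm; cases hm)]
      rw [alt_eq_bView index arr h0 hlen]
      have h1 : (index + 1).toNat = index.toNat + 1 := by omega
      rw [h1, ← hcast]
    · -- index ≥ len(arr): A's range is empty and the initial state yields -1; B's guard yields -1
      unfold next_from_even next_from_even_alt
      rw [if_neg hm1, if_pos (by omega : ¬ (0 ≤ index ∧ index < (arr.length : Int))), PySem.List.pyRange_one_eq_nil (by omega)]
      simp only [nfeLoop]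
      rw [if_pos (by omega)]
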